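-- pv_equiv track=rewrite | github.com/theogom/advent-of-code | 2015/src/day24.py | get_minimal_length_groups
-- ===== SOURCE A (Python) =====
-- from itertools import combinations
--
-- def get_minimal_length_groups(weights: list[int], group_weight: int):
--     for i in range(1, len(weights)):
--         groups = tuple(
--             filter(lambda x: sum(x) == group_weight, combinations(weights, i))
--         )
--
--         if len(groups) > 0:
--             return groups
--
--     return tuple()
-- ===== SOURCE B (Python) =====
-- def get_minimal_length_groups(weights, group_weight):
--     # enumerate every subset once (tuples, in itertools.combinations order per size)
--     subsets = [()]
--     for w in reversed(weights):
--         subsets = [(w,) + s for s in subsets] + subsets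
--     qualifying = [s for s in subsets if s and sum(s) == group_weight]
--     if not qualifying:
--         return tuple()
--     m = min(len(s) for s in qualifying)
--     return tuple(s for s in qualifying if len(s) == m)
-- ===== Notes on version B (the rewrite author's own statement) =====
-- stated objective: alternative
-- what changed: Replaces A's size-by-size loop over itertools.combinations with early exit by a single fold that enumerates all subsets once, filters the nonempty subsets with the right sum, and then selects exactly those of minimal length.
-- intended difference: On nonempty weights whose total equals group_weight while no nonempty proper subset does, A returns () because its loop range(1, len(weights)) never tries the full size, while B returns the full tuple of weights; the whole set is a valid minimal-length group there, so B's value is the intended one. — e.g. on get_minimal_length_groups([1], 1): A returns [], B returns [[1]]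
import Mathlib
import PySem

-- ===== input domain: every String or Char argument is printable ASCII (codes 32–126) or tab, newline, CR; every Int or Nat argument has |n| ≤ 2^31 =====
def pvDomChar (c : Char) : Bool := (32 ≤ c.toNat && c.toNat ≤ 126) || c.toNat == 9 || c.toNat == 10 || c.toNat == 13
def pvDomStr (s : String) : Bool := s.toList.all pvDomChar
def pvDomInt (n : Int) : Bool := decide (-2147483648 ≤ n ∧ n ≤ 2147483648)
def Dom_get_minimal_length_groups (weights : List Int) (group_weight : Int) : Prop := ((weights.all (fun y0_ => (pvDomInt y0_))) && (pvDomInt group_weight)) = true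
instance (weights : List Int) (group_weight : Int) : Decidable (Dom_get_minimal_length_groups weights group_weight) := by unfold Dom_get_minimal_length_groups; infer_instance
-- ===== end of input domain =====

-- B enumerates all subsets in one fold and keeps the qualifying subsets of minimal length
-- (objective: alternative); it intentionally also considers the full set, unlike A's
-- range(1, len(weights)) loop — that difference is stated in D_ below.

-- ===== PORT A =====
-- itertools.combinations(weights, i), ported by hand: exact lexicographic-by-position order.
def combosA : List Int → Nat → List (List Int)
  | _, 0 => [[]]
  | [], _ + 1 => []
  | x :: xs, k + 1 => (combosA xs k).map (fun s => x :: s) ++ combosA xs (k + 1)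

-- the 'for i in range(1, len(weights))' loop with its early return
def loopA (weights : List Int) (group_weight : Int) : List Nat → List (List Int)
  | [] => []
  | i :: rest =>
    let groups := (combosA weights i).filter (fun x => x.sum == group_weight)
    if groups.length > 0 then groups else loopA weights group_weight rest

-- range(1, len(weights)) ported as List.range' 1 (len - 1): exact, the bounds are Nats
def get_minimal_length_groups (weights : List Int) (group_weight : Int) : List (List Int) :=
  loopA weights group_weight (List.range' 1 (weights.length - 1))

-- ===== PORT B =====
-- Source B's fold over reversed(weights) building every subset = foldr over weights
def subsetsB (weights : List Int) : List (List Int) :=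
  weights.foldr (fun x s => s.map (fun t => x :: t) ++ s) [[]]

def get_minimal_length_groups_alt (weights : List Int) (group_weight : Int) : List (List Int) :=
  let qualifying := (subsetsB weights).filter
    (fun s => (!s.isEmpty) && (s.sum == group_weight))
  match (qualifying.map List.length).min? with
  | none => []
  | some m => qualifying.filter (fun s => s.length == m)

-- ===== PRECONDITION & SPEC =====
-- On nonempty weights whose total equals group_weight while no nonempty proper subset does,
-- A returns [] (its loop range(1, len(weights)) never tries the full size) while B returns
-- the full list of weights; the whole set is a valid minimal-length group, so B's value is intended.
def D_get_minimal_length_groups (weights : List Int) (group_weight : Int) : Prop :=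
  weights ≠ [] ∧ weights.sum = group_weight ∧
  ∀ s ∈ weights.sublists, s ≠ [] → s.length < weights.length → s.sum ≠ group_weight
instance (weights : List Int) (group_weight : Int) : Decidable (D_get_minimal_length_groups weights group_weight) := by unfold D_get_minimal_length_groups; infer_instance

def Spec_get_minimal_length_groups (weights : List Int) (group_weight : Int) (out : List (List Int)) : Prop := ¬ D_get_minimal_length_groups weights group_weight → out = get_minimal_length_groups_alt weights group_weight
instance (weights : List Int) (group_weight : Int) (out : List (List Int)) : Decidable (Spec_get_minimal_length_groups weights group_weight out) := by unfold Spec_get_minimal_length_groups; infer_instance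

def pvDiffWitness_get_minimal_length_groups : List Int × Int := ([1], 1)
def pvDiffWitnessOut_get_minimal_length_groups : (List (List Int)) × (List (List Int)) := ([], [[1]])

-- ===== CLAIM (what is proved, stated in full; the proofs are below) =====
def Claim_unchanged_get_minimal_length_groups : Prop := ∀ (weights : List Int) (group_weight : Int), Dom_get_minimal_length_groups weights group_weight → Spec_get_minimal_length_groups weights group_weight (get_minimal_length_groups weights group_weight)
def Claim_changed_get_minimal_length_groups : Prop := Dom_get_minimal_length_groups (pvDiffWitness_get_minimal_length_groups.1) (pvDiffWitness_get_minimal_length_groups.2) ∧ D_get_minimal_length_groups (pvDiffWitness_get_minimal_length_groups.1) (pvDiffWitness_get_minimal_length_groups.2) ∧ get_minimal_length_groups (pvDiffWitness_get_minimal_length_groups.1) (pvDiffWitness_get_minimal_length_groups.2) = pvDiffWitnessOut_get_minimal_length_groups.1 ∧ get_minimal_length_groups_alt (pvDiffWitness_get_minimal_length_groups.1) (pvDiffWitness_get_minimal_length_groups.2) = pvDiffWitnessOut_get_minimal_length_groups.2 ∧ pvDiffWitnessOut_get_minimal_length_groups.1 ≠ pvDiffWitnessOut_get_minimal_length_gr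oups.2
def Claim_exact_get_minimal_length_groups : Prop := ∀ (weights : List Int) (group_weight : Int), Dom_get_minimal_length_groups weights group_weight → D_get_minimal_length_groups weights group_weight → get_minimal_length_groups weights group_weight ≠ get_minimal_length_groups_alt weights group_weight

-- ===== LEMMAS AND PROOFS =====

-- helper used only by the proofs: B's old selection restricted to proper sizes
def altProper (weights : List Int) (group_weight : Int) : List (List Int) :=
  let n := weights.length
  let qualifying := (subsetsB weights).filter
    (fun s => decide (0 < s.length) && decide (s.length < n) && (s.sum == group_weight))
  match (qualifying.map List.length).min? with
  | none => []
  | some m => qualifying.filter (fun s => s.length == m)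

theorem filter_subsetsB (xs : List Int) (i : Nat) :
    (subsetsB xs).filter (fun s => s.length == i) = combosA xs i := by
  induction xs generalizing i with
  | nil =>
    cases i <;> simp [subsetsB, combosA, List.filter]
  | cons x xs ih =>
    have hsub : subsetsB (x :: xs) = (subsetsB xs).map (fun t => x :: t) ++ subsetsB xs := rfl
    cases i with
    | zero =>
      rw [hsub, List.filter_append, List.filter_map]
      simp only [Function.comp_def, List.length_cons]
      have h1 : (subsetsB xs).filter (fun t => (t.length + 1) == 0) = [] := by
        apply List.filter_eq_nil_iff.mpr; intro a _; simp
      rw [h1]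
      simp [ih 0, combosA]
    | succ k =>
      rw [hsub, List.filter_append, List.filter_map]
      simp only [Function.comp_def, List.length_cons]
      have h1 : (subsetsB xs).filter (fun t => (t.length + 1) == (k + 1))
          = (subsetsB xs).filter (fun t => t.length == k) := by
        apply List.filter_congr; intro a _; simp
      rw [h1, ih k, show combosA (x :: xs) (k + 1)
        = (combosA xs k).map (fun s => x :: s) ++ combosA xs (k + 1) from rfl, ← ih (k + 1)]

theorem mem_combosA {xs : List Int} {i : Nat} {s : List Int} :
    s ∈ combosA xs i ↔ s ∈ subsetsB xs ∧ s.length = i := by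
  rw [← filter_subsetsB, List.mem_filter]; simp

theorem mem_subsetsB_iff {xs s : List Int} : s ∈ subsetsB xs ↔ s.Sublist xs := by
  induction xs generalizing s with
  | nil => simp [subsetsB]
  | cons x xs ih =>
    have hsub : subsetsB (x :: xs) = (subsetsB xs).map (fun t => x :: t) ++ subsetsB xs := rfl
    rw [hsub]
    simp only [List.mem_append, List.mem_map]
    constructor
    · rintro (⟨t, ht, rfl⟩ | h)
      · exact (ih.mp ht).cons₂ x
      · exact (ih.mp h).cons x
    · intro h
      rcases List.sublist_cons_iff.mp h with h' | ⟨t, rfl, ht⟩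
      · exact Or.inr (ih.mpr h')
      · exact Or.inl ⟨t, ih.mpr ht, rfl⟩

theorem subsetsB_length_le {xs s : List Int} (h : s ∈ subsetsB xs) : s.length ≤ xs.length :=
  (mem_subsetsB_iff.mp h).length_le

theorem subsetsB_full {xs s : List Int} (h : s ∈ subsetsB xs) (hl : s.length = xs.length) :
    s = xs :=
  (mem_subsetsB_iff.mp h).eq_of_length hl

-- the old unconditional proof: A equals the proper-size selection, on every input
theorem a_eq_altProper (weights : List Int) (group_weight : Int) :
    get_minimal_length_groups weights group_weight = altProper weights group_weight := by
  set n := weights.length with hn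
  set G := fun i => (combosA weights i).filter (fun x => x.sum == group_weight) with hG
  set Q := (subsetsB weights).filter
      (fun s => decide (0 < s.length) && decide (s.length < n) && (s.sum == group_weight)) with hQ
  have memQ : ∀ s : List Int, s ∈ Q ↔
      s ∈ subsetsB weights ∧ 0 < s.length ∧ s.length < n ∧ s.sum = group_weight := by
    intro s; rw [hQ, List.mem_filter]; simp [and_assoc]
  have memG : ∀ (i : Nat) (s : List Int), s ∈ G i ↔
      (s ∈ subsetsB weights ∧ s.length = i) ∧ s.sum = group_weight := by
    intro i s; rw [hG]; simp only [List.mem_filter, mem_combosA]; simp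
  have loop_none : ∀ L : List Nat, (∀ i ∈ L, G i = []) → loopA weights group_weight L = [] := by
    intro L h
    induction L with
    | nil => rfl
    | cons i rest ih =>
      have hi : G i = [] := h i (by simp)
      show (if (G i).length > 0 then G i else loopA weights group_weight rest) = []
      rw [hi]; simpa using ih (fun j hj => h j (by simp [hj]))
  have loop_find : ∀ (k a m : Nat), 1 ≤ a → a ≤ m → m < a + k → G m ≠ [] →
      (∀ i, 1 ≤ i → i < m → G i = []) →
      loopA weights group_weight (List.range' a k) = G m := by
    intro k
    induction k with
    | zero => intro a m _ h1 h2 _ _; omega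
    | succ k ih =>
      intro a m ha ham hmk hGm hsmall
      rw [List.range'_succ]
      show (if (G a).length > 0 then G a else loopA weights group_weight (List.range' (a+1) k)) = G m
      by_cases hcase : a = m
      · subst hcase
        have : (G a).length > 0 := List.length_pos_iff.mpr hGm
        simp [this]
      · have hlt : a < m := lt_of_le_of_ne ham hcase
        have hGa : G a = [] := hsmall a ha hlt
        rw [hGa]
        simpa using ih (a+1) m (by omega) (by omega) (by omega) hGm hsmall
  show loopA weights group_weight (List.range' 1 (n - 1))
      = (match (Q.map List.length).min? with
         | none => []
         | some m => Q.filter (fun s => s.length == m))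
  cases hmin : (Q.map List.length).min? with
  | none =>
    have hQnil : Q = [] := by
      have := List.min?_eq_none_iff.mp hmin
      exact List.map_eq_nil_iff.mp this
    apply loop_none
    intro i hi
    rw [List.mem_range'] at hi
    obtain ⟨hi1, hi2⟩ := hi
    by_contra hne
    obtain ⟨s, hs⟩ := List.exists_mem_of_ne_nil _ hne
    rw [memG] at hs
    have : s ∈ Q := (memQ s).mpr ⟨hs.1.1, by omega, by omega, hs.2⟩
    rw [hQnil] at this; exact absurd this (List.not_mem_nil)
  | some m =>
    obtain ⟨hmem, hminle⟩ := List.min?_eq_some_iff.mp hmin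
    obtain ⟨s, hsQ, hsl⟩ := List.mem_map.mp hmem
    have hsQ' := (memQ s).mp hsQ
    have hm1 : 1 ≤ m := by omega
    have hmn : m < n := by omega
    have hGm : G m ≠ [] := by
      intro hnil
      have : s ∈ G m := (memG m s).mpr ⟨⟨hsQ'.1, hsl⟩, hsQ'.2.2.2⟩
      rw [hnil] at this; exact absurd this (List.not_mem_nil)
    have hsmall : ∀ i, 1 ≤ i → i < m → G i = [] := by
      intro i h1 h2
      by_contra hne
      obtain ⟨t, ht⟩ := List.exists_mem_of_ne_nil _ hne
      rw [memG] at ht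
      have htQ : t ∈ Q := (memQ t).mpr ⟨ht.1.1, by omega, by omega, ht.2⟩
      have : m ≤ i := hminle i (List.mem_map.mpr ⟨t, htQ, ht.1.2⟩)
      omega
    rw [loop_find (n - 1) 1 m (le_refl 1) hm1 (by omega) hGm hsmall]
    show G m = Q.filter (fun s => s.length == m)
    rw [hQ, List.filter_filter]
    simp only [hG]
    rw [← filter_subsetsB weights m, List.filter_filter]
    apply List.filter_congr
    intro a _
    by_cases hla : a.length = m
    · simp [hla, hmn]
      intro _
      omega
    · have : (a.length == m) = false := by simp [hla]
      simp [this]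

-- outside D_, B's selection over all subsets equals the proper-size selection
theorem alt_eq_altProper (weights : List Int) (group_weight : Int)
    (hD : ¬ D_get_minimal_length_groups weights group_weight) :
    get_minimal_length_groups_alt weights group_weight = altProper weights group_weight := by
  set n := weights.length with hn
  set Q' := (subsetsB weights).filter
      (fun s => (!s.isEmpty) && (s.sum == group_weight)) with hQ'
  set Q := (subsetsB weights).filter
      (fun s => decide (0 < s.length) && decide (s.length < n) && (s.sum == group_weight)) with hQ
  have memQ' : ∀ s : List Int, s ∈ Q' ↔
      s ∈ subsetsB weights ∧ 0 < s.length ∧ s.sum = group_weight := by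
    intro s
    rw [hQ', List.mem_filter]
    simp [← List.length_pos_iff, and_assoc]
  have memQ : ∀ s : List Int, s ∈ Q ↔
      s ∈ subsetsB weights ∧ 0 < s.length ∧ s.length < n ∧ s.sum = group_weight := by
    intro s; rw [hQ, List.mem_filter]; simp [and_assoc]
  show (match (Q'.map List.length).min? with
        | none => ([] : List (List Int))
        | some m => Q'.filter (fun s : List Int => s.length == m))
      = (match (Q.map List.length).min? with
         | none => []
         | some m => Q.filter (fun s : List Int => s.length == m))
  by_cases hex : ∃ s ∈ subsetsB weights, 0 < s.length ∧ s.length < n ∧ s.sum = group_weight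
  · -- some proper subset qualifies: both minima agree and are < n
    obtain ⟨s0, hs0B, hs0pos, hs0lt, hs0sum⟩ := hex
    have hs0Q : s0 ∈ Q := (memQ s0).mpr ⟨hs0B, hs0pos, hs0lt, hs0sum⟩
    have hs0Q' : s0 ∈ Q' := (memQ' s0).mpr ⟨hs0B, hs0pos, hs0sum⟩
    cases hmin' : (Q'.map List.length).min? with
    | none =>
      exact absurd (List.map_eq_nil_iff.mp (List.min?_eq_none_iff.mp hmin'))
        (List.ne_nil_of_mem hs0Q')
    | some m =>
      obtain ⟨hmem', hle'⟩ := List.min?_eq_some_iff.mp hmin'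
      have hmle : m ≤ s0.length := hle' s0.length (List.mem_map.mpr ⟨s0, hs0Q', rfl⟩)
      have hmltn : m < n := lt_of_le_of_lt hmle hs0lt
      -- the minimum m is attained by an element of Q' of length m < n, hence in Q
      obtain ⟨t, htQ', htl⟩ := List.mem_map.mp hmem'
      have htQ'' := (memQ' t).mp htQ'
      have htQ : t ∈ Q := (memQ t).mpr ⟨htQ''.1, htQ''.2.1, by omega, htQ''.2.2⟩
      -- min over Q is also m
      have hminQ : (Q.map List.length).min? = some m := by
        apply List.min?_eq_some_iff.mpr
        refine ⟨List.mem_map.mpr ⟨t, htQ, htl⟩, ?_⟩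
        intro b hb
        obtain ⟨u, huQ, hul⟩ := List.mem_map.mp hb
        have hu := (memQ u).mp huQ
        exact hle' b (List.mem_map.mpr ⟨u, (memQ' u).mpr ⟨hu.1, hu.2.1, hu.2.2.2⟩, hul⟩)
      rw [hminQ]
      -- equal filters: elements of length m automatically have length < n
      have hm1 : 0 < m := htl ▸ htQ''.2.1
      show Q'.filter (fun s => s.length == m) = Q.filter (fun s => s.length == m)
      rw [hQ', hQ, List.filter_filter, List.filter_filter]
      apply List.filter_congr
      intro a _
      by_cases hla : a.length = m
      · have hpos : a ≠ [] := by
          intro h; subst h; simp at hla; omega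
        simp [hla, hmltn, List.isEmpty_eq_false_iff, hpos, hm1]
      · have h1 : (a.length == m) = false := by simp [hla]
        simp [h1]
  · -- no proper subset qualifies: with ¬D both lists are empty
    push_neg at hex
    have hQnil : Q = [] := by
      apply List.filter_eq_nil_iff.mpr
      intro s hs
      by_contra hcond
      simp only [Bool.not_eq_false, Bool.and_eq_true, decide_eq_true_eq, beq_iff_eq] at hcond
      exact absurd hcond.2 (hex s hs (by omega) (by omega))
    have hQ'nil : Q' = [] := by
      apply List.filter_eq_nil_iff.mpr
      intro s hs
      by_contra hcond
      simp only [Bool.not_eq_false, Bool.and_eq_true, Bool.not_eq_eq_eq_not, Bool.not_true,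
        List.isEmpty_eq_false_iff, beq_iff_eq] at hcond
      obtain ⟨hne, hsum⟩ := hcond
      have hpos : 0 < s.length := List.length_pos_iff.mpr hne
      have hle : s.length ≤ n := subsetsB_length_le hs
      by_cases hfull : s.length = n
      · -- s is the full list; ¬D then forces a contradiction
        have hsw : s = weights := subsetsB_full hs hfull
        subst hsw
        apply hD
        refine ⟨hne, hsum, ?_⟩
        intro t ht htne htlt
        exact hex t (mem_subsetsB_iff.mpr (List.mem_sublists.mp ht))
          (List.length_pos_iff.mpr htne) htlt
      · exact absurd hsum (hex s hs hpos (by omega))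
    rw [hQnil, hQ'nil]

-- inside D_: A returns [] while B returns a nonempty list
theorem a_nil_of_D (weights : List Int) (group_weight : Int)
    (hD : D_get_minimal_length_groups weights group_weight) :
    get_minimal_length_groups weights group_weight = [] := by
  obtain ⟨hne, hsum, hprop⟩ := hD
  show loopA weights group_weight (List.range' 1 (weights.length - 1)) = []
  have loop_none : ∀ L : List Nat, (∀ i ∈ L, 1 ≤ i → i < weights.length → True) →
      (∀ i ∈ L, 1 ≤ i ∧ i < weights.length) → loopA weights group_weight L = [] := by
    intro L _ hrange
    induction L with
    | nil => rfl
    | cons i rest ih =>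
      have hi := hrange i (by simp)
      have hGi : (combosA weights i).filter (fun x => x.sum == group_weight) = [] := by
        apply List.filter_eq_nil_iff.mpr
        intro s hs
        obtain ⟨hsB, hsl⟩ := mem_combosA.mp hs
        have hsne : s ≠ [] := by
          intro h; subst h; simp at hsl; omega
        have := hprop s (List.mem_sublists.mpr (mem_subsetsB_iff.mp hsB)) hsne (by omega)
        simpa using this
      show (if ((combosA weights i).filter (fun x => x.sum == group_weight)).length > 0 then _
            else loopA weights group_weight rest) = []
      rw [hGi]
      simpa using ih (by simp) (fun j hj => hrange j (by simp [hj]))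
  apply loop_none _ (by simp)
  intro i hi
  rw [List.mem_range'] at hi
  omega

theorem alt_ne_nil_of_D (weights : List Int) (group_weight : Int)
    (hD : D_get_minimal_length_groups weights group_weight) :
    get_minimal_length_groups_alt weights group_weight ≠ [] := by
  obtain ⟨hne, hsum, _⟩ := hD
  set Q' := (subsetsB weights).filter
      (fun s => (!s.isEmpty) && (s.sum == group_weight)) with hQ'
  have hwB : weights ∈ subsetsB weights := mem_subsetsB_iff.mpr (List.Sublist.refl _)
  have hwQ' : weights ∈ Q' := by
    rw [hQ', List.mem_filter]
    simp [hwB, hne, hsum]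
  show (match (Q'.map List.length).min? with
        | none => ([] : List (List Int))
        | some m => Q'.filter (fun s : List Int => s.length == m)) ≠ []
  cases hmin : (Q'.map List.length).min? with
  | none =>
    exact absurd (List.map_eq_nil_iff.mp (List.min?_eq_none_iff.mp hmin))
      (List.ne_nil_of_mem hwQ')
  | some m =>
    obtain ⟨hmem, _⟩ := List.min?_eq_some_iff.mp hmin
    obtain ⟨t, htQ', htl⟩ := List.mem_map.mp hmem
    have : t ∈ Q'.filter (fun s => s.length == m) := by
      rw [List.mem_filter]
      exact ⟨htQ', by simp [htl]⟩
    exact List.ne_nil_of_mem this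

-- ===== VERDICT (by name: the statements are the Claim_ definitions above) =====
theorem get_minimal_length_groups_spec : Claim_unchanged_get_minimal_length_groups := by
  intro weights group_weight _ hD
  rw [a_eq_altProper, alt_eq_altProper weights group_weight hD]

theorem get_minimal_length_groups_changed : Claim_changed_get_minimal_length_groups := by
  unfold Claim_changed_get_minimal_length_groups; decide

theorem get_minimal_length_groups_tight : Claim_exact_get_minimal_length_groups := by
  intro weights group_weight _ hD
  rw [a_nil_of_D weights group_weight hD]
  exact fun h => alt_ne_nil_of_D weights group_weight hD h.symm
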